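-- pv_equiv track=rewrite | github.com/joshiKuldeep/ai-skill-test-backend-local | chunker.py | _split_into_line_groups
-- ===== SOURCE A (Python) =====
-- def _split_into_line_groups(text: str, group_size: int = 8) -> list[str]:
--     """
--     Split text into groups of N lines.
--     Better than sentence-splitting for structured key-value documents.
--     """
--     lines = [l for l in text.split("\n") if l.strip()]
--     groups = []
--
--     for i in range(0, len(lines), group_size):
--         group = "\n".join(lines[i:i + group_size])
--         if group.strip():
--             groups.append(group.strip())
--
--     return groups
-- ===== SOURCE B (Python) =====
-- def _split_into_line_groups(text: str, group_size: int = 8) -> list[str]: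
--     groups = []
--     buf = []
--     for line in text.split("\n"):
--         if not line.strip():
--             continue
--         buf.append(line)
--         if len(buf) == group_size:
--             groups.append("\n".join(buf).strip())
--             buf = []
--     if buf:
--         groups.append("\n".join(buf).strip())
--     return groups
-- ===== Notes on version B (the rewrite author's own statement) =====
-- stated objective: alternative
-- what changed: B replaces A's two-phase build-filtered-list-then-chunk-by-index-slices approach with a single accumulate-and-flush pass that appends each non-blank line to a buffer and emits the joined, stripped group whenever the buffer reaches group_size, flushing the trailing partial buffer at the end.
-- outside the precondition, e.g. on _split_into_line_groups('a\nb', -1): A returns [], B returns ['a\nb']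
import Mathlib
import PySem

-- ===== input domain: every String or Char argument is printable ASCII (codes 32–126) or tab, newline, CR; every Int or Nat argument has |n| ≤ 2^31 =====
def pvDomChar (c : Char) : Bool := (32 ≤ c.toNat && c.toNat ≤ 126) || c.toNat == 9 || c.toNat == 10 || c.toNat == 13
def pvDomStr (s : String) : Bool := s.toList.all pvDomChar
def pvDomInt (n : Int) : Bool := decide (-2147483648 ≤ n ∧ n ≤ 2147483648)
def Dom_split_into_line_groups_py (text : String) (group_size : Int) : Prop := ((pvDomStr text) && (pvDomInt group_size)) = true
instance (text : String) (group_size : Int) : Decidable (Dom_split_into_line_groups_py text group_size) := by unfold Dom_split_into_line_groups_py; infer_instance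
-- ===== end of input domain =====

-- B replaces A's index/slice chunking with a single accumulate-and-flush pass over the lines (alternative decomposition, same cost).


-- ===== PORT A =====
def split_into_line_groups_py (text : String) (group_size : Int) : List String :=
  let lines := ((PySem.Str.split? text "\n").getD []).filter (fun l => PySem.Str.strip l != "")
  (PySem.List.pyRange 0 (lines.length : Int) group_size).foldl
    (fun groups i =>
      let group := PySem.Str.join "\n" (PySem.List.slice lines (some i) (some (i + group_size)))
      if PySem.Str.strip group != "" then groups ++ [PySem.Str.strip group] else groups)
    []

-- ===== PORT B =====
def split_into_line_groups_py_alt (text : String) (group_size : Int) : List String :=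
  let st := ((PySem.Str.split? text "\n").getD []).foldl
    (fun (st : List String × List String) l =>
      if PySem.Str.strip l == "" then st
      else
        let buf := st.2 ++ [l]
        if (buf.length : Int) == group_size then
          (st.1 ++ [PySem.Str.strip (PySem.Str.join "\n" buf)], ([] : List String))
        else (st.1, buf))
    ([], [])
  if st.2.isEmpty then st.1 else st.1 ++ [PySem.Str.strip (PySem.Str.join "\n" st.2)]

-- ===== PRECONDITION & SPEC =====
-- Pre_ restricts to the natural domain of a chunk size, group_size ≥ 1: on group_size = 0 A raises
-- ValueError (range step 0), and on negative group_size A's empty range returns [] — an artefact of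
-- index chunking on a meaningless size, where B groups all lines into one chunk.
def Pre_split_into_line_groups_py (text : String) (group_size : Int) : Prop := 1 ≤ group_size
instance (text : String) (group_size : Int) : Decidable (Pre_split_into_line_groups_py text group_size) := by unfold Pre_split_into_line_groups_py; infer_instance
def pvWitness_split_into_line_groups_py : String × Int := ("a\nb\n \nc", 2)
def Spec_split_into_line_groups_py (text : String) (group_size : Int) (out : List String) : Prop := out = split_into_line_groups_py_alt text group_size
instance (text : String) (group_size : Int) (out : List String) : Decidable (Spec_split_into_line_groups_py text group_size out) := by unfold Spec_split_into_line_groups_py; infer_instance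

-- ===== CLAIM (what is proved, stated in full; the proofs are below) =====
def Claim_equal_split_into_line_groups_py : Prop := ∀ (text : String) (group_size : Int), Dom_split_into_line_groups_py text group_size → Pre_split_into_line_groups_py text group_size → Spec_split_into_line_groups_py text group_size (split_into_line_groups_py text group_size)

-- ===== LEMMAS AND PROOFS =====

-- the chunking both programs compute: groups of (gm+1) lines, each joined with '\n' and stripped
def chunkG (gm : Nat) : List String → List String
  | [] => []
  | l :: rest =>
      PySem.Str.strip (PySem.Str.join "\n" (l :: rest.take gm)) :: chunkG gm (rest.drop gm)
termination_by ls => ls.length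
decreasing_by simp

-- B's final flush, as a named helper for the lemmas below (definitionally the port's trailing `if`)
def flushB (st : List String × List String) : List String :=
  if st.2.isEmpty then st.1 else st.1 ++ [PySem.Str.strip (PySem.Str.join "\n" st.2)]

lemma strip_ne_nil_of_mem {cs : List Char} {c : Char}
    (hc : c ∈ cs) (hcs : ¬ PySem.Chars.isspace c) : PySem.Chars.strip cs ≠ [] := by
  intro h
  simp only [PySem.Chars.strip, PySem.Chars.rstrip, PySem.Chars.lstrip] at h
  rw [List.reverse_eq_nil_iff, List.dropWhile_eq_nil_iff] at h
  have h2 : ∀ x ∈ List.dropWhile PySem.Chars.isspace cs, PySem.Chars.isspace x := by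
    intro x hx; exact h x (List.mem_reverse.mpr hx)
  have hc' : c ∈ List.takeWhile PySem.Chars.isspace cs ++ List.dropWhile PySem.Chars.isspace cs := by
    rw [List.takeWhile_append_dropWhile]; exact hc
  rcases List.mem_append.mp hc' with h1 | h1
  · exact hcs (List.mem_takeWhile_imp h1)
  · exact hcs (h2 c h1)

lemma strip_join_ne_empty (l : String) (rest : List String)
    (hl : PySem.Str.strip l ≠ "") :
    PySem.Str.strip (PySem.Str.join "\n" (l :: rest)) ≠ "" := by
  -- l has a non-space character
  have hex : ∃ c ∈ l.toList, ¬ PySem.Chars.isspace c := by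
    by_contra hall
    push Not at hall
    apply hl
    have h1 : PySem.Chars.lstrip l.toList = [] := by
      simp only [PySem.Chars.lstrip]
      exact List.dropWhile_eq_nil_iff.mpr (fun x hx => hall x hx)
    rw [← String.toList_eq_nil_iff, PySem.Str.toList_strip]
    simp [PySem.Chars.strip, h1, PySem.Chars.rstrip]
  obtain ⟨c, hc, hcs⟩ := hex
  intro h
  rw [← String.toList_eq_nil_iff, PySem.Str.toList_strip] at h
  refine strip_ne_nil_of_mem ?_ hcs h
  rw [PySem.Str.toList_join]
  cases rest with
  | nil =>
      rw [show List.map String.toList [l] = [l.toList] by simp, PySem.Chars.join_singleton]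
      exact hc
  | cons r rs =>
      rw [show (List.map String.toList (l :: r :: rs)) = l.toList :: r.toList :: List.map String.toList rs by simp]
      rw [PySem.Chars.join_cons_cons]
      simp only [List.mem_append]
      exact Or.inl (Or.inl hc)

-- A's fold over pyRange equals chunkG, for group_size = gm+1 and non-blank lines
lemma A_fold (gm : Nat) : ∀ (n : Nat) (lines : List String), lines.length = n →
    (∀ l ∈ lines, PySem.Str.strip l ≠ "") → ∀ (acc : List String),
    (PySem.List.pyRange 0 (lines.length : Int) ((gm : Int) + 1)).foldl
      (fun groups i =>
        let group := PySem.Str.join "\n"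
          (PySem.List.slice lines (some i) (some (i + ((gm : Int) + 1))))
        if PySem.Str.strip group != "" then groups ++ [PySem.Str.strip group] else groups)
      acc = acc ++ chunkG gm lines := by
  intro n
  induction n using Nat.strong_induction_on with
  | _ n ih =>
    intro lines hlen hnb acc
    have hg : (0:Int) < (gm:Int) + 1 := by omega
    match lines with
    | [] =>
        rw [List.length_nil, Int.natCast_zero, PySem.List.pyRange_of_pos _ _ hg]
        simp [chunkG]
    | l :: rest =>
        have hn : n = rest.length + 1 := by simpa using hlen.symm
        rw [PySem.List.pyRange_of_pos _ _ hg]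
        have hlt : (0:Int) < ((l :: rest).length : Int) := by
          simp only [List.length_cons]; push_cast; omega
        rw [if_pos hlt]
        have h2 : (rest.length : Int) / ((gm:Int)+1) = ((rest.length / (gm+1) : Nat) : Int) := by
          rw [Int.natCast_ediv]; push_cast; rfl
        have hC : (((((l :: rest).length : Int)) - 0 + ((gm:Int)+1) - 1) / ((gm:Int)+1)).toNat
            = rest.length / (gm+1) + 1 := by
          have h1 : ((((l :: rest).length : Int)) - 0 + ((gm:Int)+1) - 1)
              = (rest.length : Int) + 1 * ((gm:Int)+1) := by
            simp only [List.length_cons]; push_cast; ring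
          rw [h1, Int.add_mul_ediv_right _ _ (by omega : ((gm:Int)+1) ≠ 0), h2]
          generalize rest.length / (gm+1) = d
          omega
        rw [hC, List.range_succ_eq_map, List.foldl_map, List.foldl_cons]
        -- the first chunk
        have hslice0 : PySem.List.slice (l :: rest) (some (0 + ((gm:Int)+1) * ((0:Nat):Int)))
            (some (0 + ((gm:Int)+1) * ((0:Nat):Int) + ((gm:Int)+1))) = l :: rest.take gm := by
          have e2 : (0 + ((gm:Int)+1) * ((0:Nat):Int) + ((gm:Int)+1)) = (((0:Nat)):Int) + ((gm+1 : Nat):Int) := by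
            push_cast; ring
          have e1 : (0 + ((gm:Int)+1) * ((0:Nat):Int)) = (((0:Nat)):Int) := by push_cast; ring
          rw [e2, e1, PySem.List.slice_natCast_add]
          simp [List.take_succ_cons]
        rw [hslice0]
        have hne : PySem.Str.strip (PySem.Str.join "\n" (l :: rest.take gm)) ≠ "" := by
          apply strip_join_ne_empty
          exact hnb l (List.mem_cons_self ..)
        rw [if_pos (by simpa [bne_iff_ne] using hne)]
        rw [List.foldl_map]
        -- remaining chunks: the recursive call on rest.drop gm
        have hrec := ih (rest.length - gm) (by omega) (rest.drop gm) (by simp)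
          (fun l' hl' => hnb l' (List.mem_cons_of_mem _ (List.mem_of_mem_drop hl')))
          (acc ++ [PySem.Str.strip (PySem.Str.join "\n" (l :: rest.take gm))])
        rw [PySem.List.pyRange_of_pos _ _ hg] at hrec
        -- counts agree
        have hcnt : (if (0:Int) < ((rest.drop gm).length : Int) then
            (((((rest.drop gm).length : Int)) - 0 + ((gm:Int)+1) - 1) / ((gm:Int)+1)).toNat else 0)
            = rest.length / (gm+1) := by
          rcases Nat.lt_or_ge gm rest.length with hlt' | hge
          · rw [if_pos (by rw [List.length_drop]; omega)]
            have e1 : ((((rest.drop gm).length : Int)) - 0 + ((gm:Int)+1) - 1) = (rest.length : Int) := by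
              rw [List.length_drop]; push_cast [hlt'.le]; ring
            rw [e1, h2]
            generalize rest.length / (gm+1) = d
            omega
          · rw [if_neg (by rw [List.length_drop]; omega)]
            rw [Nat.div_eq_of_lt (by omega)]
        rw [hcnt, List.foldl_map] at hrec
        -- rewrite the goal's RHS into the recursive shape
        show _ = acc ++ chunkG gm (l :: rest)
        rw [chunkG]
        rw [show acc ++ (PySem.Str.strip (PySem.Str.join "\n" (l :: rest.take gm)) :: chunkG gm (rest.drop gm))
            = (acc ++ [PySem.Str.strip (PySem.Str.join "\n" (l :: rest.take gm))]) ++ chunkG gm (rest.drop gm) by simp]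
        refine (PySem.List.foldl_congr_mem _ _ _ _ ?_).trans hrec
        intro acc2 k hk
        simp only []
        have hs1 : PySem.List.slice (l :: rest) (some (0 + ((gm:Int)+1) * ((k.succ : Nat) : Int)))
            (some (0 + ((gm:Int)+1) * ((k.succ : Nat) : Int) + ((gm:Int)+1)))
            = List.take (gm+1) (List.drop ((gm+1)*(k+1)) (l :: rest)) := by
          have e2 : (0 + ((gm:Int)+1) * ((k.succ : Nat) : Int) + ((gm:Int)+1))
              = (((gm+1) * (k+1) : Nat) : Int) + (((gm+1) : Nat) : Int) := by push_cast; ring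
          have e1 : (0 + ((gm:Int)+1) * ((k.succ : Nat) : Int)) = (((gm+1) * (k+1) : Nat) : Int) := by
            push_cast; ring
          rw [e2, e1, PySem.List.slice_natCast_add]
        have hs2 : PySem.List.slice (rest.drop gm) (some (0 + ((gm:Int)+1) * ((k : Nat) : Int)))
            (some (0 + ((gm:Int)+1) * ((k : Nat) : Int) + ((gm:Int)+1)))
            = List.take (gm+1) (List.drop ((gm+1)*k) (rest.drop gm)) := by
          have e4 : (0 + ((gm:Int)+1) * ((k : Nat) : Int) + ((gm:Int)+1))
              = (((gm+1) * k : Nat) : Int) + (((gm+1) : Nat) : Int) := by push_cast; ring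
          have e3 : (0 + ((gm:Int)+1) * ((k : Nat) : Int)) = (((gm+1) * k : Nat) : Int) := by
            push_cast; ring
          rw [e4, e3, PySem.List.slice_natCast_add]
        have hdrop : List.drop ((gm+1)*(k+1)) (l :: rest) = List.drop ((gm+1)*k) (rest.drop gm) := by
          rw [show (gm+1)*(k+1) = gm + (gm+1)*k + 1 by ring, List.drop_succ_cons, List.drop_drop]
        rw [hs1, hs2, hdrop]

-- B's fold equals the fold over the filtered lines (blank lines are skipped by the first branch)
lemma B_fold_filter (g : Int) (ls : List String) (st : List String × List String) :
    ls.foldl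
      (fun (st : List String × List String) l =>
        if PySem.Str.strip l == "" then st
        else
          let buf := st.2 ++ [l]
          if (buf.length : Int) == g then
            (st.1 ++ [PySem.Str.strip (PySem.Str.join "\n" buf)], ([] : List String))
          else (st.1, buf)) st
    = (ls.filter (fun l => PySem.Str.strip l != "")).foldl
      (fun (st : List String × List String) l =>
          let buf := st.2 ++ [l]
          if (buf.length : Int) == g then
            (st.1 ++ [PySem.Str.strip (PySem.Str.join "\n" buf)], ([] : List String))
          else (st.1, buf)) st := by
  induction ls generalizing st with
  | nil => rfl
  | cons l rest ih =>
      rw [List.foldl_cons, List.filter_cons]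
      by_cases h : (PySem.Str.strip l == "") = true
      · have hcond : ¬ ((PySem.Str.strip l != "") = true) := by simp [bne, h]
        rw [if_pos h, if_neg hcond]
        exact ih st
      · have h' : (PySem.Str.strip l == "") = false := by
          revert h; cases PySem.Str.strip l == "" <;> simp
        have hcond : (PySem.Str.strip l != "") = true := by simp [bne, h']
        rw [if_neg h, if_pos hcond, List.foldl_cons]
        exact ih _

lemma chunkG_full (gm : Nat) (xs ys : List String) (h : xs.length = gm + 1) :
    chunkG gm (xs ++ ys) = PySem.Str.strip (PySem.Str.join "\n" xs) :: chunkG gm ys := by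
  match xs, h with
  | x :: xt, h =>
      have hxt : xt.length = gm := by simpa using h
      rw [List.cons_append, chunkG]
      rw [List.take_left' hxt, List.drop_left' hxt]

-- B's accumulate-and-flush over (filtered) lines equals chunkG: buffer invariant
lemma B_fold (gm : Nat) (ls : List String) : ∀ (groups buf : List String),
    buf.length < gm + 1 →
    flushB (ls.foldl
      (fun (st : List String × List String) l =>
          let buf := st.2 ++ [l]
          if (buf.length : Int) == ((gm : Int) + 1) then
            (st.1 ++ [PySem.Str.strip (PySem.Str.join "\n" buf)], ([] : List String))
          else (st.1, buf)) (groups, buf))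
    = groups ++ chunkG gm (buf ++ ls) := by
  induction ls with
  | nil =>
      intro groups buf hbuf
      match buf, hbuf with
      | [], _ => simp [flushB, chunkG]
      | b :: bs, hbuf =>
          have hbs : bs.length < gm := by simpa using hbuf
          rw [List.foldl_nil, List.append_nil, chunkG]
          rw [List.take_of_length_le hbs.le, List.drop_eq_nil_of_le hbs.le]
          simp [flushB, chunkG]
  | cons l rest ih =>
      intro groups buf hbuf
      simp only [List.foldl_cons]
      by_cases hfull : buf.length = gm
      · rw [if_pos (by simp [List.length_append, hfull])]
        rw [ih (groups ++ [PySem.Str.strip (PySem.Str.join "\n" (buf ++ [l]))]) [] (by simp)]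
        rw [show buf ++ l :: rest = (buf ++ [l]) ++ rest by simp]
        rw [chunkG_full gm (buf ++ [l]) rest (by simp [hfull])]
        simp
      · rw [if_neg (by simp [List.length_append]; omega)]
        rw [ih groups (buf ++ [l]) (by simp [List.length_append]; omega)]
        simp

lemma flushB_eq (st : List String × List String) :
    (if st.2.isEmpty then st.1 else st.1 ++ [PySem.Str.strip (PySem.Str.join "\n" st.2)]) = flushB st := rfl

-- ===== VERDICT (by name: the statement is the Claim_ definition above) =====
theorem split_into_line_groups_py_spec : Claim_equal_split_into_line_groups_py := by
  intro text g _ hpre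
  have hg1 : (1:Int) ≤ g := hpre
  unfold Spec_split_into_line_groups_py split_into_line_groups_py split_into_line_groups_py_alt
  rw [B_fold_filter]
  simp only [flushB_eq]
  set ls := (PySem.Str.split? text "\n").getD [] with hls
  set fl := ls.filter (fun l => PySem.Str.strip l != "") with hfl
  have hnb : ∀ l ∈ fl, PySem.Str.strip l ≠ "" := by
    intro l hl
    have := List.of_mem_filter hl
    simpa [bne_iff_ne] using this
  set gm : Nat := g.toNat - 1 with hgm
  have hgeq : g = (gm : Int) + 1 := by omega
  rw [hgeq]
  rw [A_fold gm fl.length fl rfl hnb []]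
  rw [B_fold gm fl [] [] (by simp)]
  simp
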